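-- pv_equiv track=rewrite | github.com/Relaxed-System-Lab/Sim4Txt2SQL | tools/scripts/test.py | calculate_tokens
-- ===== SOURCE A (Python) =====
-- def calculate_tokens(conversation_tokens):
--     """
--     Calculate the number of generated tokens and prefill tokens.
--
--     Args:
--     conversation_tokens (list): A list of lists, where each sublist represents the number of tokens in a turn of the conversation.
--
--     Returns:
--     dict: A dictionary with keys 'generated_tokens' and 'prefill_tokens'.
--     """
--     prefill_tokens = 0
--     cachable_tokens = 0
--     for i, turn in enumerate(conversation_tokens):
--         if i % 2 != 0:
--             # bot's turn
--             prefill_tokens += sum(conversation_tokens[:i])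
--             # cacheable tokens
--             if i > 1:
--                 cachable_tokens += sum(conversation_tokens[: i - 1])
--     return prefill_tokens, cachable_tokens
-- ===== SOURCE B (Python) =====
-- def calculate_tokens(conversation_tokens):
--     """Single pass with a running prefix sum instead of re-summing slices."""
--     prefill_tokens = 0
--     cachable_tokens = 0
--     prefix = 0   # sum of turns before the current one
--     prev = 0     # previous turn's tokens
--     for i, turn in enumerate(conversation_tokens):
--         if i % 2 == 1:
--             prefill_tokens += prefix
--             if i > 1:
--                 cachable_tokens += prefix - prev
--         prefix += turn
--         prev = turn
--     return prefill_tokens, cachable_tokens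
-- ===== Notes on version B (the rewrite author's own statement) =====
-- stated objective: faster
-- what changed: Replaced the per-bot-turn re-summation of list prefixes (sum(conversation_tokens[:i]) inside the loop) with a single pass maintaining a running prefix sum and the previous element.
import Mathlib
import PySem

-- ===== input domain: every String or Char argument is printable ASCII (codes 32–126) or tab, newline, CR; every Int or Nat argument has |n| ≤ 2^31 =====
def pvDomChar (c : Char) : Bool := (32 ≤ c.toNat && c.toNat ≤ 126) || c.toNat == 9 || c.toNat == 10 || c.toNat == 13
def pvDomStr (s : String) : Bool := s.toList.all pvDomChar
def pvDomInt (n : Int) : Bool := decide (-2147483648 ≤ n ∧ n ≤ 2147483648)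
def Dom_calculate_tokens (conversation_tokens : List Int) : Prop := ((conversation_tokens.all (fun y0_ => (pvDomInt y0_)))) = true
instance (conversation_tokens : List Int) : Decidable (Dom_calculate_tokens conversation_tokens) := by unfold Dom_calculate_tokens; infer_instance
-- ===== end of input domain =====

-- B replaces A's per-bot-turn re-summation of list pfxes with a single pass keeping a running pfx sum (O(n^2) → O(n)).


-- ===== PORT A =====
-- step of A's loop body (captures the whole list for the slice sums, like the Python closure over conversation_tokens)
def ctStepA (xs : List Int) (st : Int × Int) (p : Int × Int) : Int × Int :=
  let prefill := st.1
  let cachable := st.2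
  let i := p.1
  if i % 2 ≠ 0 then
    let prefill := prefill + (PySem.List.slice xs none (some i)).sum
    let cachable := if i > 1 then cachable + (PySem.List.slice xs none (some (i - 1))).sum else cachable
    (prefill, cachable)
  else (prefill, cachable)

def calculate_tokens (conversation_tokens : List Int) : List Int :=
  let st := (PySem.List.enumerate conversation_tokens 0).foldl (ctStepA conversation_tokens) (0, 0)
  [st.1, st.2]

-- ===== PORT B =====
-- step of B's loop body: state (prefill, cachable, pfx, prev)
def ctStepB (st : Int × Int × Int × Int) (p : Int × Int) : Int × Int × Int × Int :=
  let (prefill, cachable, pfx, prev) := st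
  let i := p.1
  let turn := p.2
  if i % 2 = 1 then
    let prefill := prefill + pfx
    let cachable := if i > 1 then cachable + (pfx - prev) else cachable
    (prefill, cachable, pfx + turn, turn)
  else (prefill, cachable, pfx + turn, turn)

def calculate_tokens_alt (conversation_tokens : List Int) : List Int :=
  let st := (PySem.List.enumerate conversation_tokens 0).foldl ctStepB (0, 0, 0, 0)
  [st.1, st.2.1]

-- ===== PRECONDITION & SPEC =====
def Spec_calculate_tokens (conversation_tokens : List Int) (out : List Int) : Prop := out = calculate_tokens_alt conversation_tokens
instance (conversation_tokens : List Int) (out : List Int) : Decidable (Spec_calculate_tokens conversation_tokens out) := by unfold Spec_calculate_tokens; infer_instance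

-- ===== CLAIM (what is proved, stated in full; the proofs are below) =====
def Claim_equal_calculate_tokens : Prop := ∀ (conversation_tokens : List Int), Dom_calculate_tokens conversation_tokens → Spec_calculate_tokens conversation_tokens (calculate_tokens conversation_tokens)

-- ===== LEMMAS AND PROOFS =====

-- Invariant: with front the already-processed pfx (xs = front ++ ys), B's running
-- state carries front.sum and front's last element, and both folds agree on the
-- (prefill, cachable) components.
lemma ct_key (xs : List Int) : ∀ (ys front : List Int), xs = front ++ ys → ∀ (p c : Int),
    (let r := (PySem.List.enumerate ys (front.length : Int)).foldl ctStepB (p, c, front.sum, front.getLastD 0)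
     (r.1, r.2.1))
    = (PySem.List.enumerate ys (front.length : Int)).foldl (ctStepA xs) (p, c) := by
  intro ys
  induction ys with
  | nil => intro front h p c; simp [PySem.List.enumerate]
  | cons y t ih =>
    intro front h p c
    rw [PySem.List.enumerate_cons]
    simp only [List.foldl_cons]
    have hfl : ((front.length : Int)) + 1 = ((front ++ [y]).length : Int) := by
      simp
    have hx : xs = (front ++ [y]) ++ t := by simp [h]
    -- evaluate both step functions at index front.length
    by_cases hodd : (front.length : Int) % 2 = 1
    · have hA : ctStepA xs (p, c) ((front.length : Int), y)
          = (p + front.sum, if (front.length : Int) > 1 then c + (front.sum - front.getLastD 0) else c) := by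
        have hslice : PySem.List.slice xs none (some (front.length : Int)) = front := by
          rw [PySem.List.slice_to_natCast]
          simp [h]
        simp only [ctStepA, hodd]
        rw [hslice]
        by_cases h1 : ((front.length : Int)) > 1
        · have hfront : front ≠ [] := by
            intro hf; subst hf; simp at h1
          have hlen1 : ((front.length : Int)) - 1 = ((front.length - 1 : Nat) : Int) := by
            have : 1 ≤ front.length := by
              cases front with
              | nil => exact absurd rfl hfront
              | cons a l => simp
            omega
          have hslice1 : PySem.List.slice xs none (some ((front.length : Int) - 1)) = front.dropLast := by
            rw [hlen1, PySem.List.slice_to_natCast, h, List.take_append_of_le_length (by omega)]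
            rw [List.dropLast_eq_take]
          have hds : front.dropLast.sum = front.sum - front.getLastD 0 := by
            obtain ⟨a, fr, hfr⟩ : ∃ a fr, front = fr ++ [a] :=
              ⟨front.getLast hfront, front.dropLast, (List.dropLast_append_getLast hfront).symm⟩
            subst hfr
            simp
          simp [h1, hslice1, hds]
        · simp [h1]
      have hB : ctStepB (p, c, front.sum, front.getLastD 0) ((front.length : Int), y)
          = (p + front.sum, (if (front.length : Int) > 1 then c + (front.sum - front.getLastD 0) else c), front.sum + y, y) := by
        simp [ctStepB, hodd]
      have h2 := ih (front ++ [y]) hx (p + front.sum)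
        (if (front.length : Int) > 1 then c + (front.sum - front.getLastD 0) else c)
      simp only [List.sum_append, List.sum_cons, List.sum_nil, add_zero, List.getLastD_concat,
        List.length_append, List.length_cons, List.length_nil, Nat.cast_add, Nat.cast_one,
        zero_add] at h2
      rw [hA, hB]
      exact h2
    · have heven : (front.length : Int) % 2 = 0 := by omega
      have hA : ctStepA xs (p, c) ((front.length : Int), y) = (p, c) := by
        simp [ctStepA, heven]
      have hB : ctStepB (p, c, front.sum, front.getLastD 0) ((front.length : Int), y)
          = (p, c, front.sum + y, y) := by
        simp [ctStepB, heven]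
      have h2 := ih (front ++ [y]) hx p c
      simp only [List.sum_append, List.sum_cons, List.sum_nil, add_zero, List.getLastD_concat,
        List.length_append, List.length_cons, List.length_nil, Nat.cast_add, Nat.cast_one,
        zero_add] at h2
      rw [hA, hB]
      exact h2

-- ===== VERDICT (by name: the statement is the Claim_ definition above) =====
theorem calculate_tokens_spec : Claim_equal_calculate_tokens := by
  intro xs _
  unfold Spec_calculate_tokens calculate_tokens calculate_tokens_alt
  have := ct_key xs xs [] rfl 0 0
  simp only [List.length_nil, Nat.cast_zero, List.sum_nil, List.getLastD_nil] at this
  rw [← this]
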